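-- pv_equiv track=rewrite | github.com/huggingface/lerobot | examples/sarm/compute_rabc_weights.py | generate_strided_indices
-- ===== SOURCE A (Python) =====
-- def generate_strided_indices(
--     ep_start: int, ep_end: int, stride: int = 30, num_window_frames: int = 9
-- ) -> list[int]:
--     """Generate frame indices ordered by window structure for efficient temporal coverage.
--
--     For SARM, each 9-frame window is [0, second, second+30, second+60, ..., current_frame] where:
--     - Frame 0: always episode start (initial frame)
--     - Frames 1-8: 8 frames at stride=30 intervals, with second = current_frame - 7*stride
--
--     Processing order (non-overlapping chunks first, then remaining):
--
--     Chunk 0 (second_frame 1→30, current 211→240):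
--       [0,1,31,61,91,121,151,181,211]     ← second=1, current=211
--       [0,2,32,62,92,122,152,182,212]     ← second=2, current=212
--       ...
--       [0,30,60,90,120,150,180,210,240]   ← second=30, current=240
--
--     Chunk 1 (second_frame 241→270, current 451→480):
--       [0,241,271,301,331,361,391,421,451] ← second=241, current=451
--       [0,242,272,302,332,362,392,422,452] ← second=242, current=452
--       ...
--
--     Then remaining frames (0-210, 241-450, etc.) are filled at the end.
--     """
--     num_frames = ep_end - ep_start
--     window_span = (num_window_frames - 2) * stride  # 7 * 30 = 210 (current - second)
--     chunk_size = (num_window_frames - 1) * stride  # 8 * 30 = 240 (gap between chunk starts)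
--
--     indices = []
--
--     # Process in chunks: chunk 0 starts at second_frame=1, chunk 1 at second_frame=241, etc.
--     chunk_idx = 0
--     while True:
--         chunk_start_second = chunk_idx * chunk_size + 1  # 1, 241, 481, ...
--         chunk_end_second = chunk_start_second + stride  # 31, 271, 511, ...
--
--         any_valid = False
--         for second_frame in range(chunk_start_second, chunk_end_second):
--             current_frame = second_frame + window_span  # second + 210
--             if current_frame < num_frames:
--                 indices.append(ep_start + current_frame)
--                 any_valid = True
--
--         if not any_valid:
--             break
--         chunk_idx += 1
--
--     # Fill in remaining frames (those not covered by the chunk pattern)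
--     covered = set(indices)
--     for i in range(ep_start, ep_end):
--         if i not in covered:
--             indices.append(i)
--
--     return indices
-- ===== SOURCE B (Python) =====
-- def generate_strided_indices(
--     ep_start: int, ep_end: int, stride: int = 30, num_window_frames: int = 9
-- ) -> list[int]:
--     """Same indices via a closed-form membership test on the zero-based offset.
--
--     An offset c = i - ep_start is a chunk "current frame" iff c >= first and
--     (c - first) % chunk_size < stride, where first = window_span + 1.  Pass 1
--     emits the chunk current frames in increasing order; pass 2 appends every
--     remaining frame of the episode.  No nested chunk loop, no covered set.
--     """
--     num_frames = ep_end - ep_start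
--     first = (num_window_frames - 2) * stride + 1  # offset of the first chunk current frame
--     chunk_size = (num_window_frames - 1) * stride
--
--     def is_chunk_current(c: int) -> bool:
--         return c >= first and (c - first) % chunk_size < stride
--
--     indices = [ep_start + c for c in range(first, num_frames) if is_chunk_current(c)]
--     indices += [i for i in range(ep_start, ep_end) if not is_chunk_current(i - ep_start)]
--     return indices
-- ===== Notes on version B (the rewrite author's own statement) =====
-- stated objective: simpler
-- what changed: Replaces the nested chunk while-loop and the covered set with a closed-form modular membership predicate on the zero-based offset, applied in two flat passes (chunk current frames in order, then the remaining frames); this drops the per-frame set construction and membership machinery.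
-- outside the precondition, e.g. on generate_strided_indices(0, 5, 0, 9): A returns [0, 1, 2, 3, 4], B raises ZeroDivisionError
import Mathlib
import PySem

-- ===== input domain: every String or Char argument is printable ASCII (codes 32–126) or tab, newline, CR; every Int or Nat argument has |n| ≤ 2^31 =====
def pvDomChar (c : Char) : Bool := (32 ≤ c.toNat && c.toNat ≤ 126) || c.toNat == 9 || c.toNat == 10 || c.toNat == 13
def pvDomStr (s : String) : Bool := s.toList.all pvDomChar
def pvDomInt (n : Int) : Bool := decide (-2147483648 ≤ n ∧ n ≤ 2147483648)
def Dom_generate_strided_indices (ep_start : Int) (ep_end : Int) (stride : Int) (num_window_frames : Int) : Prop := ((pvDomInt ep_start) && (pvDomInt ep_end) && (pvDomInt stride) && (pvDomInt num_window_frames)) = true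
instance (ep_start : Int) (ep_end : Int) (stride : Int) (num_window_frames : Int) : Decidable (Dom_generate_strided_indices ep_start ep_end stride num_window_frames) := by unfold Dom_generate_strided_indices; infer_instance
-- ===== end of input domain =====

-- B replaces A's nested chunk while-loop and covered set by a closed-form modular
-- membership predicate on the zero-based offset, used in two flat passes (simpler).


-- ===== PORT A =====
-- the 'while True' chunk loop of A, made total with a fuel argument (inside
-- Pre_ the supplied fuel always exceeds the number of chunks A processes)
def gsiChunkLoop (ep_start : Int) (stride : Int) (window_span : Int) (chunk_size : Int)
    (num_frames : Int) : Nat → Int → List Int → List Int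
  | 0, _, indices => indices
  | fuel + 1, chunk_idx, indices =>
    let chunk_start_second := chunk_idx * chunk_size + 1
    let chunk_end_second := chunk_start_second + stride
    let st := (PySem.List.pyRange chunk_start_second chunk_end_second 1).foldl
      (fun st second_frame =>
        if second_frame + window_span < num_frames then
          (st.1 ++ [ep_start + (second_frame + window_span)], true)
        else st)
      (indices, false)
    if st.2 then gsiChunkLoop ep_start stride window_span chunk_size num_frames fuel (chunk_idx + 1) st.1
    else st.1

def generate_strided_indices (ep_start : Int) (ep_end : Int) (stride : Int) (num_window_frames : Int) : List Int :=
  let num_frames := ep_end - ep_start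
  let window_span := (num_window_frames - 2) * stride
  let chunk_size := (num_window_frames - 1) * stride
  let indices := gsiChunkLoop ep_start stride window_span chunk_size num_frames (num_frames.toNat + 1) 0 []
  let covered : PySem.Set Int := PySem.Set.ofList indices
  (PySem.List.pyRange ep_start ep_end 1).foldl
    (fun acc i => if !(PySem.Set.contains covered i) then acc ++ [i] else acc) indices

-- ===== PORT B =====
def gsiIsChunkCurrent (first : Int) (chunk_size : Int) (stride : Int) (c : Int) : Bool :=
  decide (first ≤ c) && decide (PySem.Int.mod (c - first) chunk_size < stride)

def generate_strided_indices_alt (ep_start : Int) (ep_end : Int) (stride : Int) (num_window_frames : Int) : List Int :=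
  let num_frames := ep_end - ep_start
  let first := (num_window_frames - 2) * stride + 1
  let chunk_size := (num_window_frames - 1) * stride
  ((PySem.List.pyRange first num_frames 1).filter
      (fun c => gsiIsChunkCurrent first chunk_size stride c)).map (fun c => ep_start + c)
    ++ (PySem.List.pyRange ep_start ep_end 1).filter
      (fun i => !(gsiIsChunkCurrent first chunk_size stride (i - ep_start)))

-- ===== PRECONDITION & SPEC =====
-- Pre_ admits positive stride with at least two window frames (the function's domain),
-- plus every degenerate empty episode on which A still terminates; it excludes nonpositive
-- stride / num_window_frames < 2 on non-empty episodes, where A's chunk loop is vacuous,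
-- diverges, or appends out-of-episode indices, and B's modular predicate divides by zero
-- or is meaningless.
def Pre_generate_strided_indices (ep_start : Int) (ep_end : Int) (stride : Int) (num_window_frames : Int) : Prop :=
  (1 ≤ stride ∧ 2 ≤ num_window_frames) ∨
    (ep_end ≤ ep_start ∧ ep_end - ep_start ≤ (num_window_frames - 2) * stride + 1)
instance (ep_start : Int) (ep_end : Int) (stride : Int) (num_window_frames : Int) : Decidable (Pre_generate_strided_indices ep_start ep_end stride num_window_frames) := by unfold Pre_generate_strided_indices; infer_instance

def pvWitness_generate_strided_indices : Int × Int × Int × Int := (0, 10, 2, 3)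

def Spec_generate_strided_indices (ep_start : Int) (ep_end : Int) (stride : Int) (num_window_frames : Int) (out : List Int) : Prop := out = generate_strided_indices_alt ep_start ep_end stride num_window_frames
instance (ep_start : Int) (ep_end : Int) (stride : Int) (num_window_frames : Int) (out : List Int) : Decidable (Spec_generate_strided_indices ep_start ep_end stride num_window_frames out) := by unfold Spec_generate_strided_indices; infer_instance

-- ===== CLAIM (what is proved, stated in full; the proofs are below) =====
def Claim_equal_generate_strided_indices : Prop := ∀ (ep_start : Int) (ep_end : Int) (stride : Int) (num_window_frames : Int), Dom_generate_strided_indices ep_start ep_end stride num_window_frames → Pre_generate_strided_indices ep_start ep_end stride num_window_frames → Spec_generate_strided_indices ep_start ep_end stride num_window_frames (generate_strided_indices ep_start ep_end stride num_window_frames)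


-- ===== LEMMAS AND PROOFS =====

-- shifting an integer range
theorem gsi_pyRange_shift (a b d : Int) :
    (PySem.List.pyRange a b 1).map (fun x => x + d) = PySem.List.pyRange (a + d) (b + d) 1 := by
  rw [PySem.List.pyRange_one, PySem.List.pyRange_one, List.map_map]
  have h : (b + d - (a + d)).toNat = (b - a).toNat := by omega
  rw [h]
  apply List.map_congr_left
  intro k _
  simp [Function.comp]
  ring

-- the membership predicate is true exactly on the stride-prefix of each chunk
theorem gsi_pred_true (ws s k c : Int) (hs : 1 ≤ s) (hws : 0 ≤ ws) (hk : 0 ≤ k)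
    (h1 : k * (ws + s) + ws + 1 ≤ c) (h2 : c < k * (ws + s) + ws + 1 + s) :
    gsiIsChunkCurrent (ws + 1) (ws + s) s c = true := by
  have hKpos : (0 : Int) < ws + s := by omega
  have hkK : 0 ≤ k * (ws + s) := mul_nonneg hk (le_of_lt hKpos)
  have hr : c - (ws + 1) = (c - k * (ws + s) - (ws + 1)) + (ws + s) * k := by ring
  unfold gsiIsChunkCurrent
  rw [PySem.Int.mod_eq_emod_of_pos hKpos, hr, Int.add_mul_emod_self_left,
    Int.emod_eq_of_lt (by linarith) (by linarith)]
  simp only [Bool.and_eq_true, decide_eq_true_eq]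
  constructor <;> linarith

-- and false on the rest of each chunk
theorem gsi_pred_false (ws s k c : Int) (hs : 1 ≤ s) (hws : 0 ≤ ws) (hk : 0 ≤ k)
    (h1 : k * (ws + s) + ws + 1 + s ≤ c) (h2 : c < (k + 1) * (ws + s) + ws + 1) :
    gsiIsChunkCurrent (ws + 1) (ws + s) s c = false := by
  have hKpos : (0 : Int) < ws + s := by omega
  have hr : c - (ws + 1) = (c - k * (ws + s) - (ws + 1)) + (ws + s) * k := by ring
  have h2' : c < k * (ws + s) + (ws + s) + ws + 1 := by nlinarith
  unfold gsiIsChunkCurrent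
  rw [PySem.Int.mod_eq_emod_of_pos hKpos, hr, Int.add_mul_emod_self_left,
    Int.emod_eq_of_lt (by linarith) (by linarith)]
  have hns : ¬ (c - k * (ws + s) - (ws + 1) < s) := by linarith
  simp [hns]

-- A's inner for-loop over one chunk: what it appends and whether any frame was valid
theorem gsi_inner_spec (ep ws N : Int) (l : List Int) (acc : List Int) (b : Bool) :
    l.foldl (fun st sec => if sec + ws < N then (st.1 ++ [ep + (sec + ws)], true) else st) (acc, b)
      = (acc ++ (l.filter (fun sec => decide (sec + ws < N))).map (fun sec => ep + (sec + ws)),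
         b || l.any (fun sec => decide (sec + ws < N))) := by
  induction l generalizing acc b with
  | nil => simp
  | cons x xs ih =>
    by_cases h : x + ws < N
    · simp [h, ih]
    · simp [h, ih]

-- A's chunk while-loop appends exactly the predicate-selected offsets, in order
theorem gsi_loop_spec (ep s ws N : Int) (hs : 1 ≤ s) (hws : 0 ≤ ws) :
    ∀ (fuel : Nat) (k : Int) (indices : List Int), 0 ≤ k →
      N ≤ k * (ws + s) + (ws + 1) + (fuel : Int) * (ws + s) →
      gsiChunkLoop ep s ws (ws + s) N fuel k indices
        = indices ++ ((PySem.List.pyRange (k * (ws + s) + (ws + 1)) N 1).filter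
            (fun c => gsiIsChunkCurrent (ws + 1) (ws + s) s c)).map (fun c => ep + c) := by
  intro fuel
  induction fuel with
  | zero =>
    intro k indices hk hfuel
    rw [PySem.List.pyRange_one_eq_nil (by push_cast at hfuel; linarith)]
    simp [gsiChunkLoop]
  | succ fuel ih =>
    intro k indices hk hfuel
    have hKpos : (0 : Int) < ws + s := by omega
    simp only [gsiChunkLoop, gsi_inner_spec, Bool.false_or]
    by_cases hN : N ≤ k * (ws + s) + ws + 1
    · -- no valid frame in this chunk: the loop stops and nothing remains to cover
      have hfe : (PySem.List.pyRange (k * (ws + s) + 1) (k * (ws + s) + 1 + s) 1).filter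
          (fun sec => decide (sec + ws < N)) = [] := by
        apply List.filter_eq_nil_iff.mpr
        intro sec hsec
        rw [PySem.List.mem_pyRange_one] at hsec
        simp only [decide_eq_true_eq]
        push_neg
        linarith [hsec.1]
      have hae : (PySem.List.pyRange (k * (ws + s) + 1) (k * (ws + s) + 1 + s) 1).any
          (fun sec => decide (sec + ws < N)) = false := by
        apply List.any_eq_false.mpr
        intro sec hsec
        rw [PySem.List.mem_pyRange_one] at hsec
        simp only [decide_eq_true_eq]
        push_neg
        linarith [hsec.1]
      rw [hfe, hae, PySem.List.pyRange_one_eq_nil (by linarith)]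
      simp
    · -- the chunk contributes: peel it off and use the induction hypothesis
      push_neg at hN
      have hat : (PySem.List.pyRange (k * (ws + s) + 1) (k * (ws + s) + 1 + s) 1).any
          (fun sec => decide (sec + ws < N)) = true := by
        apply List.any_eq_true.mpr
        refine ⟨k * (ws + s) + 1, ?_, ?_⟩
        · rw [PySem.List.mem_pyRange_one]; constructor <;> linarith
        · simp only [decide_eq_true_eq]; linarith
      rw [hat]
      simp only [if_true]
      rw [ih (k + 1) _ (by linarith) (by push_cast at hfuel ⊢; nlinarith)]
      rw [List.append_assoc]
      congr 1
      -- the appended chunk, rewritten over current-frame offsets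
      have hchunk : ((PySem.List.pyRange (k * (ws + s) + 1) (k * (ws + s) + 1 + s) 1).filter
            (fun sec => decide (sec + ws < N))).map (fun sec => ep + (sec + ws))
          = ((PySem.List.pyRange (k * (ws + s) + 1 + ws) (k * (ws + s) + 1 + s + ws) 1).filter
            (fun c => decide (c < N))).map (fun c => ep + c) := by
        rw [← gsi_pyRange_shift (k * (ws + s) + 1) (k * (ws + s) + 1 + s) ws,
          List.filter_map, List.map_map]
        rfl
      rw [hchunk]
      set A0 : Int := k * (ws + s) + 1 + ws with hA0
      have hT0 : k * (ws + s) + (ws + 1) = A0 := by rw [hA0]; ring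
      have hA1 : (k + 1) * (ws + s) + (ws + 1) = A0 + (ws + s) := by rw [hA0]; ring
      have hB0 : k * (ws + s) + 1 + s + ws = A0 + s := by rw [hA0]; ring
      rw [hT0, hA1, hB0]
      set M1 : Int := min (A0 + s) N with hM1
      set M2 : Int := min (A0 + (ws + s)) N with hM2
      have hA0N : A0 < N := by linarith [hA0]
      have hA0M1 : A0 ≤ M1 := by rw [hM1]; exact le_min (by linarith) (by linarith)
      have hM1M2 : M1 ≤ M2 := by rw [hM1, hM2]; exact min_le_min (by linarith) le_rfl
      have hM2N : M2 ≤ N := by rw [hM2]; exact min_le_right _ _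
      have hM1le : M1 ≤ A0 + s := by rw [hM1]; exact min_le_left _ _
      have hM2le : M2 ≤ A0 + (ws + s) := by rw [hM2]; exact min_le_left _ _
      have hsplit : PySem.List.pyRange A0 N 1
          = PySem.List.pyRange A0 M1 1 ++ (PySem.List.pyRange M1 M2 1 ++ PySem.List.pyRange M2 N 1) := by
        rw [← PySem.List.pyRange_one_append M1 M2 N hM1M2 hM2N,
          ← PySem.List.pyRange_one_append A0 M1 N hA0M1 (le_trans hM1M2 hM2N)]
      rw [hsplit, List.filter_append, List.filter_append]
      have hp1 : (PySem.List.pyRange A0 M1 1).filter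
          (fun c => gsiIsChunkCurrent (ws + 1) (ws + s) s c) = PySem.List.pyRange A0 M1 1 := by
        apply List.filter_eq_self.mpr
        intro c hc
        rw [PySem.List.mem_pyRange_one] at hc
        exact gsi_pred_true ws s k c hs hws hk (by linarith [hc.1, hA0])
          (by linarith [hc.2, hM1le, hA0])
      have hp2 : (PySem.List.pyRange M1 M2 1).filter
          (fun c => gsiIsChunkCurrent (ws + 1) (ws + s) s c) = [] := by
        apply List.filter_eq_nil_iff.mpr
        intro c hc
        rw [PySem.List.mem_pyRange_one] at hc
        have hB0c : A0 + s ≤ c := by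
          by_cases hB0N : A0 + s ≤ N
          · have : M1 = A0 + s := by rw [hM1]; exact min_eq_left hB0N
            linarith [hc.1]
          · push_neg at hB0N
            exfalso
            have h2' : M2 = N := by rw [hM2]; exact min_eq_right (by linarith)
            have h1' : M1 = N := by rw [hM1]; exact min_eq_right (by linarith)
            rw [h1'] at hc
            rw [h2'] at hc
            linarith [hc.1, hc.2]
        have hcM2 : c < A0 + (ws + s) := lt_of_lt_of_le hc.2 hM2le
        have hexp : (k + 1) * (ws + s) = k * (ws + s) + (ws + s) := by ring
        simp only [Bool.not_eq_true]
        exact gsi_pred_false ws s k c hs hws hk (by linarith [hA0])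
          (by linarith [hA0, hexp])
      have hp3 : PySem.List.pyRange M2 N 1 = PySem.List.pyRange (A0 + (ws + s)) N 1 := by
        by_cases hA1N : A0 + (ws + s) ≤ N
        · rw [hM2, min_eq_left hA1N]
        · push_neg at hA1N
          rw [hM2, min_eq_right (by linarith), PySem.List.pyRange_one_eq_nil le_rfl,
            PySem.List.pyRange_one_eq_nil (by linarith)]
      have hc1 : (PySem.List.pyRange A0 (A0 + s) 1).filter (fun c => decide (c < N))
          = PySem.List.pyRange A0 M1 1 := by
        by_cases hB0N : A0 + s ≤ N
        · rw [hM1, min_eq_left hB0N]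
          apply List.filter_eq_self.mpr
          intro c hc
          rw [PySem.List.mem_pyRange_one] at hc
          simp only [decide_eq_true_eq]
          linarith [hc.2]
        · push_neg at hB0N
          rw [hM1, min_eq_right (by linarith),
            PySem.List.pyRange_one_append A0 N (A0 + s) (by linarith) (by linarith),
            List.filter_append]
          have e1 : (PySem.List.pyRange A0 N 1).filter (fun c => decide (c < N))
              = PySem.List.pyRange A0 N 1 := by
            apply List.filter_eq_self.mpr
            intro c hc
            rw [PySem.List.mem_pyRange_one] at hc
            simp only [decide_eq_true_eq]
            exact hc.2
          have e2 : (PySem.List.pyRange N (A0 + s) 1).filter (fun c => decide (c < N)) = [] := by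
            apply List.filter_eq_nil_iff.mpr
            intro c hc
            rw [PySem.List.mem_pyRange_one] at hc
            simp only [decide_eq_true_eq]
            push_neg
            exact hc.1
          rw [e1, e2, List.append_nil]
      rw [hc1, hp1, hp2, hp3]
      simp


-- ===== VERDICT (by name: the statement is the Claim_ definition above) =====
theorem generate_strided_indices_spec : Claim_equal_generate_strided_indices := by
  unfold Claim_equal_generate_strided_indices
  intro ep ee s w _hdom hpre
  rcases hpre with ⟨hs, hw⟩ | ⟨h1, h2⟩
  swap
  · -- degenerate empty episode: both programs return []
    unfold Spec_generate_strided_indices generate_strided_indices generate_strided_indices_alt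
    simp only []
    have hNt : (ee - ep).toNat = 0 := by omega
    rw [hNt]
    simp only [gsiChunkLoop, gsi_inner_spec, Bool.false_or]
    have hfe : (PySem.List.pyRange (0 * ((w - 1) * s) + 1) (0 * ((w - 1) * s) + 1 + s) 1).filter
        (fun sec => decide (sec + (w - 2) * s < ee - ep)) = [] := by
      apply List.filter_eq_nil_iff.mpr
      intro sec hsec
      rw [PySem.List.mem_pyRange_one] at hsec
      simp only [decide_eq_true_eq]
      push_neg
      linarith [hsec.1]
    have hae : (PySem.List.pyRange (0 * ((w - 1) * s) + 1) (0 * ((w - 1) * s) + 1 + s) 1).any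
        (fun sec => decide (sec + (w - 2) * s < ee - ep)) = false := by
      apply List.any_eq_false.mpr
      intro sec hsec
      rw [PySem.List.mem_pyRange_one] at hsec
      simp only [decide_eq_true_eq]
      push_neg
      linarith [hsec.1]
    rw [hfe, hae,
      PySem.List.pyRange_one_eq_nil (show ee ≤ ep from h1),
      PySem.List.pyRange_one_eq_nil (show ee - ep ≤ (w - 2) * s + 1 from h2)]
    simp
  unfold Spec_generate_strided_indices generate_strided_indices generate_strided_indices_alt
  simp only []
  have hws : 0 ≤ (w - 2) * s := mul_nonneg (by omega) (by omega)
  have hK : (w - 1) * s = (w - 2) * s + s := by ring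
  set N : Int := ee - ep with hN
  set ws : Int := (w - 2) * s with hws'
  -- enough fuel for every chunk A processes
  have hfuel : N ≤ 0 * (ws + s) + (ws + 1) + ((N.toNat + 1 : Nat) : Int) * (ws + s) := by
    have ha : (N : Int) ≤ ((N.toNat : Nat) : Int) := Int.self_le_toNat N
    have h1 : ((N.toNat : Nat) : Int) + 1 ≤ (((N.toNat : Nat) : Int) + 1) * (ws + s) := by
      nlinarith [Int.natCast_nonneg N.toNat]
    push_cast
    linarith
  have hza : (0 : Int) * (ws + s) + (ws + 1) = ws + 1 := by ring
  rw [hK, gsi_loop_spec ep s ws N hs hws ((ee - ep).toNat + 1) 0 [] le_rfl (by rw [← hN]; exact hfuel),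
    hza, List.nil_append]
  rw [PySem.List.foldl_append_if_eq_filter]
  congr 1
  apply List.filter_congr
  intro i hi
  rw [PySem.List.mem_pyRange_one] at hi
  congr 1
  rw [Bool.eq_iff_iff, PySem.Set.contains_iff, PySem.Set.mem_ofList]
  constructor
  · rintro hmem
    obtain ⟨c, hc, hci⟩ := List.mem_map.mp hmem
    obtain ⟨hcr, hcp⟩ := List.mem_filter.mp hc
    have : i - ep = c := by omega
    rw [this]
    exact hcp
  · intro hp
    apply List.mem_map.mpr
    refine ⟨i - ep, List.mem_filter.mpr ⟨?_, hp⟩, by omega⟩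
    rw [PySem.List.mem_pyRange_one]
    have h1 : ws + 1 ≤ i - ep := by
      have := (Bool.and_eq_true _ _).mp hp
      exact of_decide_eq_true this.1
    exact ⟨h1, by omega⟩
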